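-- pv_equiv track=rewrite | github.com/stipula-language/stipula-analyzer | analyzer.py | _print_constraint
-- ===== SOURCE A (Python) =====
-- def _print_constraint(dependency_tuple):
--     if not dependency_tuple:
--         return '0'
--     dependency_list = []
--     actual_dependency = dependency_tuple[0]
--     dependency_counter = 1
--     for dependency in (
--         *dependency_tuple[1:],
--         None,
--     ):
--         if dependency == actual_dependency:
--             dependency_counter += 1
--             continue
--         dependency_list.append(f"{f'{dependency_counter} ' if dependency_counter > 1 else ''}{actual_dependency}")
--         actual_dependency = dependency
--         dependency_counter = 1
--     return ' + '.join(dependency_list)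
-- ===== SOURCE B (Python) =====
-- def _print_constraint(dependency_tuple):
--     if not dependency_tuple:
--         return '0'
--     n = len(dependency_tuple)
--     starts = [i for i in range(n)
--               if i == 0 or dependency_tuple[i] != dependency_tuple[i - 1]]
--     ends = starts[1:] + [n]
--     parts = []
--     for s, e in zip(starts, ends):
--         c = e - s
--         v = dependency_tuple[s]
--         parts.append(f"{c} {v}" if c > 1 else v)
--     return ' + '.join(parts)
-- ===== Notes on version B (the rewrite author's own statement) =====
-- stated objective: alternative
-- what changed: B first computes the list of run-start indices by filtering range(n) on a neighbour-inequality test, then formats each (start, end) pair from zipping the starts with their successors, replacing A's previous-value/counter state machine with its appended None sentinel.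
import Mathlib
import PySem

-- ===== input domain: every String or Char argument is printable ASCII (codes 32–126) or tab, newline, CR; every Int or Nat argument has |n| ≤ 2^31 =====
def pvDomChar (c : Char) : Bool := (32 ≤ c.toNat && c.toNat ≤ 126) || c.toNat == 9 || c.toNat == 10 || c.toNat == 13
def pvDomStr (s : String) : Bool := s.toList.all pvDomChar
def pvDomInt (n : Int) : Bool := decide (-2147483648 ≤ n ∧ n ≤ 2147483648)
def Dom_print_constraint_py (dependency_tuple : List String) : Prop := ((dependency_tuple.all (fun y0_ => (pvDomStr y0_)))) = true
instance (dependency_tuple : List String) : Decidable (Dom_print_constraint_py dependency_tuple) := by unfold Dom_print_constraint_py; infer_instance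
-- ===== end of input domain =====

-- B computes the run-start indices by filtering range(n) on a neighbour-inequality test and
-- formats each (start, end) segment from zipping the starts with their successors, replacing
-- A's previous-value/counter state machine with its None sentinel; objective: alternative.

-- ===== PORT A =====
-- one loop iteration of A: state = (dependency_list, actual_dependency, dependency_counter)
def pvAStep (st : List String × Option String × Int) (dep : Option String) :
    List String × Option String × Int :=
  let (acc, actual, cnt) := st
  if dep == actual then (acc, actual, cnt + 1)
  else
    (acc ++ [(if cnt > 1 then PySem.Int.toStr cnt ++ " " else "") ++
             (match actual with | some s => s | none => "None")], dep, 1)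

def print_constraint_py (dependency_tuple : List String) : String :=
  match dependency_tuple with
  | [] => "0"
  | x :: t =>
    -- for dependency in (*dependency_tuple[1:], None):
    let st := ((t.map some) ++ [none]).foldl pvAStep ([], some x, (1 : Int))
    PySem.Str.join " + " st.1

-- ===== PORT B =====
-- starts = [i for i in range(n) if i == 0 or xs[i] != xs[i-1]]
-- (indices i and i-1 are always in range here, so plain `getD` is exact for Python's xs[i])
def pvStarts (xs : List String) : List Nat :=
  (List.range xs.length).filter (fun i => i == 0 || !(xs.getD i "" == xs.getD (i - 1) ""))

-- one part per (s, e) pair: c = e - s; "c v" if c > 1 else v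
def pvFmt (xs : List String) (se : Nat × Nat) : String :=
  let c : Int := (se.2 : Int) - (se.1 : Int)
  let v := xs.getD se.1 ""
  if c > 1 then PySem.Int.toStr c ++ " " ++ v else v

def print_constraint_py_alt (dependency_tuple : List String) : String :=
  match dependency_tuple with
  | [] => "0"
  | _ :: _ =>
    let n := dependency_tuple.length
    let starts := pvStarts dependency_tuple
    let ends := starts.drop 1 ++ [n]
    let parts := (starts.zip ends).map (pvFmt dependency_tuple)
    PySem.Str.join " + " parts

-- ===== PRECONDITION & SPEC =====
def Spec_print_constraint_py (dependency_tuple : List String) (out : String) : Prop := out = print_constraint_py_alt dependency_tuple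
instance (dependency_tuple : List String) (out : String) : Decidable (Spec_print_constraint_py dependency_tuple out) := by unfold Spec_print_constraint_py; infer_instance

-- ===== CLAIM (what is proved, stated in full; the proofs are below) =====
def Claim_equal_print_constraint_py : Prop := ∀ (dependency_tuple : List String), Dom_print_constraint_py dependency_tuple → Spec_print_constraint_py dependency_tuple (print_constraint_py dependency_tuple)

-- ===== LEMMAS AND PROOFS =====

-- bridge notion used by both halves of the proof: the formatted runs of the list
def pvRuns : List String → List String
  | [] => []
  | v :: t =>
    let k := (t.takeWhile (fun y => y == v)).length
    let c : Int := (k : Int) + 1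
    (if c > 1 then PySem.Int.toStr c ++ " " ++ v else v) :: pvRuns (t.drop k)
  termination_by xs => xs.length
  decreasing_by simp

-- A's flush format equals the runs' part format (for actual = some x)
theorem pvFmt_eq (c : Int) (x : String) :
    (if c > 1 then PySem.Int.toStr c ++ " " else "") ++ x =
    (if c > 1 then PySem.Int.toStr c ++ " " ++ x else x) := by
  split_ifs <;> simp [String.append_assoc]

theorem pv_drop_takeWhile (p : String → Bool) (t : List String) :
    t.drop (t.takeWhile p).length = t.dropWhile p := by
  calc t.drop (t.takeWhile p).length
      = (t.takeWhile p ++ t.dropWhile p).drop (t.takeWhile p).length := by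
        rw [List.takeWhile_append_dropWhile]
    _ = t.dropWhile p := List.drop_left

theorem pvRuns_cons (v : String) (t : List String) :
    pvRuns (v :: t) =
      (if ((t.takeWhile (fun y => y == v)).length : Int) + 1 > 1
        then PySem.Int.toStr (((t.takeWhile (fun y => y == v)).length : Int) + 1) ++ " " ++ v
        else v) :: pvRuns (t.dropWhile (fun y => y == v)) := by
  rw [pvRuns.eq_def]
  simp only [← pv_drop_takeWhile (fun y => y == v) t]

-- ===== A-side: A's loop produces the runs =====
theorem pvA_loop (t : List String) (x : String) (c : Int) (acc : List String) :
    (((t.map some) ++ [none]).foldl pvAStep (acc, some x, c)).1 =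
      acc ++ ((if ((t.takeWhile (fun y => y == x)).length : Int) + c > 1
                then PySem.Int.toStr (((t.takeWhile (fun y => y == x)).length : Int) + c) ++ " " ++ x
                else x) :: pvRuns (t.dropWhile (fun y => y == x))) := by
  induction t generalizing x c acc with
  | nil =>
    simp [pvAStep, pvRuns, ← pvFmt_eq]
  | cons y ys ih =>
    by_cases h : (y == x) = true
    · have hx : y = x := by simpa using h
      subst hx
      simp only [List.map_cons, List.cons_append, List.foldl_cons, pvAStep,
        beq_self_eq_true, if_true]
      rw [ih y (c + 1) acc]
      simp only [List.takeWhile_cons, beq_self_eq_true, if_true, List.dropWhile_cons,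
        List.length_cons]
      have hc : ((ys.takeWhile (fun y_1 => y_1 == y)).length : Int) + (c + 1) =
          (((ys.takeWhile (fun y_1 => y_1 == y)).length + 1 : Nat) : Int) + c := by
        push_cast; ring
      rw [hc]
    · simp only [List.map_cons, List.cons_append, List.foldl_cons, pvAStep]
      have hb : (some y == some x) = false := by simpa using h
      simp only [hb, Bool.false_eq_true, if_false]
      rw [ih y 1 _]
      simp only [List.takeWhile_cons, List.dropWhile_cons, h, Bool.false_eq_true, if_false,
        List.length_nil, Nat.cast_zero, zero_add, List.append_assoc, List.singleton_append]
      rw [pvRuns_cons, pvFmt_eq]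

-- ===== B-side: the boundary pipeline produces the runs =====

-- elements inside the first run (index ≤ run length) are all the head value
theorem pv_getD_small (v : String) (t : List String) (i : Nat)
    (hi : i ≤ (t.takeWhile (fun y => y == v)).length) :
    (v :: t).getD i "" = v := by
  induction i generalizing t with
  | zero => simp
  | succ j ih =>
    cases t with
    | nil => simp at hi
    | cons y t' =>
      by_cases h : (y == v) = true
      · have hy : y = v := by simpa using h
        subst hy
        rw [List.getD_cons_succ]
        exact ih t' (by simpa [List.takeWhile_cons, h] using hi)
      · simp [h] at hi
 
-- elements past the first run are the remainder, shifted
theorem pv_getD_shift_aux (p : String → Bool) (t : List String) (i : Nat) :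
    t.getD ((t.takeWhile p).length + i) "" = (t.dropWhile p).getD i "" := by
  induction t with
  | nil => simp
  | cons y t' ih =>
    by_cases h : p y = true
    · simp only [List.takeWhile_cons, h, if_true, List.dropWhile_cons, List.length_cons]
      have : (t'.takeWhile p).length + 1 + i = ((t'.takeWhile p).length + i) + 1 := by omega
      rw [this, List.getD_cons_succ, ih]
    · simp [h]

theorem pv_getD_shift (v : String) (t : List String) (i : Nat) :
    (v :: t).getD (i + ((t.takeWhile (fun y => y == v)).length + 1)) "" =
      (t.dropWhile (fun y => y == v)).getD i "" := by
  have h1 : i + ((t.takeWhile (fun y => y == v)).length + 1) =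
      ((t.takeWhile (fun y => y == v)).length + i) + 1 := by omega
  rw [h1, List.getD_cons_succ, pv_getD_shift_aux]

-- the run-start indices of a list = 0, then the starts of the remainder shifted by the run length
theorem pvStarts_run (v : String) (t : List String) :
    pvStarts (v :: t) =
      0 :: (pvStarts (t.dropWhile (fun y => y == v))).map
        (fun i => i + ((t.takeWhile (fun y => y == v)).length + 1)) := by
  classical
  set p : String → Bool := fun y => y == v with hp
  set k := (t.takeWhile p).length with hk
  set r := t.dropWhile p with hr
  set xs := v :: t with hxs
  set q : Nat → Bool := fun i => (i == 0) || !(xs.getD i "" == xs.getD (i - 1) "") with hq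
  have hlen : xs.length = (k + 1) + r.length := by
    have := List.takeWhile_append_dropWhile (p := p) (l := t)
    have ht : t.length = k + r.length := by
      conv_lhs => rw [← this]
      rw [List.length_append]
    simp [hxs, ht]; omega
  have hsmall : ∀ i, i ≤ k → xs.getD i "" = v := fun i hi => pv_getD_small v t i hi
  have hshift : ∀ i, xs.getD (i + (k + 1)) "" = r.getD i "" := fun i => pv_getD_shift v t i
  show (List.range xs.length).filter q = 0 :: (pvStarts r).map (fun i => i + (k + 1))
  rw [hlen, List.range_add, List.filter_append]
  have h1 : (List.range (k + 1)).filter q = [0] := by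
    rw [List.range_succ_eq_map, List.filter_cons]
    have hq0 : q 0 = true := by simp [hq]
    rw [if_pos hq0]
    have : (List.map Nat.succ (List.range k)).filter q = [] := by
      rw [List.filter_map, List.filter_eq_nil_iff.2]
      · simp
      · intro j hj
        have hjk : j < k := by simpa using (List.mem_range.1 hj)
        simp only [Function.comp, hq, Nat.succ_eq_add_one]
        have e1 : xs.getD (j + 1) "" = v := hsmall (j + 1) (by omega)
        have e2 : xs.getD (j + 1 - 1) "" = v := by
          have : j + 1 - 1 = j := by omega
          rw [this]; exact hsmall j (by omega)
        rw [e1, e2]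
        simp
    rw [this]
  have h2 : (List.map (fun x => k + 1 + x) (List.range r.length)).filter q =
      (pvStarts r).map (fun i => i + (k + 1)) := by
    rw [List.filter_map]
    have hcong : (List.range r.length).filter (q ∘ fun x => k + 1 + x) =
        (List.range r.length).filter
          (fun i => (i == 0) || !(r.getD i "" == r.getD (i - 1) "")) := by
      apply List.filter_congr
      intro i hi
      have hir : i < r.length := List.mem_range.1 hi
      simp only [Function.comp]
      cases i with
      | zero =>
        cases hr2 : r with
        | nil => rw [hr2] at hir; simp at hir
        | cons w t'' =>
          have hd : List.dropWhile p t = w :: t'' := by rw [← hr, hr2]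
          have hne : p w = false := by
            have h5 := List.head_dropWhile_not p (l := t) (w := by rw [hd]; simp)
            simp only [hd, List.head_cons] at h5
            exact h5
          have e1 : xs.getD (k + 1 + 0) "" = w := by
            have h6 := hshift 0
            rw [hr2] at h6
            simpa [Nat.add_comm] using h6
          have e2 : xs.getD (k + 1 + 0 - 1) "" = v := by
            have h7 : k + 1 + 0 - 1 = k := by omega
            rw [h7]; exact hsmall k (by omega)
          have hb : (w == v) = false := by simpa [hp] using hne
          simp only [hq]
          rw [e1, e2]
          simp [hb]
      | succ j =>
        have e1 : xs.getD (k + 1 + (j + 1)) "" = r.getD (j + 1) "" := by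
          have := hshift (j + 1); simpa [Nat.add_comm] using this
        have e2 : xs.getD (k + 1 + (j + 1) - 1) "" = r.getD j "" := by
          have h3 : k + 1 + (j + 1) - 1 = j + (k + 1) := by omega
          rw [h3]; exact hshift j
        have h4 : j + 1 - 1 = j := by omega
        simp only [hq]
        rw [e1, e2, h4]
        simp
    rw [hcong]
    show List.map (fun x => k + 1 + x) (pvStarts r) = _
    simp [Nat.add_comm]
  rw [h1, h2]
  rfl

theorem pv_len_split (v : String) (t : List String) :
    (v :: t).length =
      (t.dropWhile (fun y => y == v)).length + ((t.takeWhile (fun y => y == v)).length + 1) := by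
  have h0 := List.takeWhile_append_dropWhile (p := fun y => y == v) (l := t)
  have ht : t.length =
      (t.takeWhile (fun y => y == v)).length + (t.dropWhile (fun y => y == v)).length := by
    conv_lhs => rw [← h0]
    rw [List.length_append]
  simp [ht]; omega

theorem pvFmt_head (v : String) (t : List String) (k : Nat) :
    pvFmt (v :: t) (0, k + 1) =
      (if (k : Int) + 1 > 1 then PySem.Int.toStr ((k : Int) + 1) ++ " " ++ v else v) := by
  have hc : (((k + 1 : Nat) : Int) - ((0 : Nat) : Int)) = (k : Int) + 1 := by push_cast; ring
  simp only [pvFmt, List.getD_cons_zero]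
  rw [hc]

theorem pvParts_eq_runs (xs : List String) :
    ((pvStarts xs).zip ((pvStarts xs).drop 1 ++ [xs.length])).map (pvFmt xs) = pvRuns xs := by
  induction hn : xs.length using Nat.strong_induction_on generalizing xs with
  | _ n ih =>
    cases xs with
    | nil => simp [pvStarts, pvRuns]
    | cons v t =>
      subst hn
      rw [pvStarts_run v t, pvRuns_cons]
      rcases hE : (t.dropWhile (fun y => y == v)) with _ | ⟨w, t''⟩
      · -- single run: t is all v's
        have hk : (v :: t).length = (t.takeWhile (fun y => y == v)).length + 1 := by
          have := pv_len_split v t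
          rw [hE] at this
          simpa using this
        simp only [pvStarts, List.length_nil, List.range_zero, List.filter_nil,
          List.map_nil, List.drop_one, List.tail_cons, List.nil_append, List.zip_cons_cons,
          List.zip_nil_right, List.map_cons, pvRuns]
        rw [hk, pvFmt_head]
      · -- at least two runs
        obtain ⟨T, hT⟩ : ∃ T, pvStarts (w :: t'') = 0 :: T := ⟨_, pvStarts_run w t''⟩
        have hlen : (v :: t).length =
            ((w :: t'').length) + ((t.takeWhile (fun y => y == v)).length + 1) := by
          have := pv_len_split v t
          rw [hE] at this
          exact this
        set f : Nat → Nat := fun i => i + ((t.takeWhile (fun y => y == v)).length + 1) with hf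
        have hmapf : (pvStarts (w :: t'')).map f = f 0 :: T.map f := by rw [hT]; rfl
        rw [hmapf]
        have hzip : ((0 :: f 0 :: T.map f).zip
              ((0 :: f 0 :: T.map f).drop 1 ++ [(v :: t).length])) =
            (0, f 0) :: (f 0 :: T.map f).zip (T.map f ++ [f ((w :: t'').length)]) := by
          simp only [List.drop_one, List.tail_cons, List.cons_append, List.zip_cons_cons,
            hlen, hf]
        rw [hzip]
        have hsing : T.map f ++ [f ((w :: t'').length)] =
            (T ++ [(w :: t'').length]).map f := by
          rw [List.map_append]; rfl
        rw [hsing, ← List.map_cons (f := f) (a := (0:Nat)) (l := T), List.zip_map, List.map_cons, List.map_map]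
        have hfun : ∀ se : Nat × Nat,
            (pvFmt (v :: t) ∘ Prod.map f f) se = pvFmt (w :: t'') se := by
          intro se
          rcases se with ⟨a, b⟩
          simp only [Function.comp, Prod.map, pvFmt, hf]
          have hc : ((b + ((t.takeWhile (fun y => y == v)).length + 1) : Nat) : Int) -
              ((a + ((t.takeWhile (fun y => y == v)).length + 1) : Nat) : Int) =
              (b : Int) - (a : Int) := by push_cast; ring
          have hg : (v :: t).getD (a + ((t.takeWhile (fun y => y == v)).length + 1)) "" =
              (w :: t'').getD a "" := by
            have h9 := pv_getD_shift v t a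
            rw [hE] at h9
            exact h9
          rw [hc, hg]
        rw [List.map_congr_left (fun se _ => hfun se)]
        have hrec : ((0 :: T).zip (T ++ [(w :: t'').length])).map (pvFmt (w :: t'')) =
            pvRuns (w :: t'') := by
          have h10 := ih (w :: t'').length (by omega) (w :: t'') rfl
          rw [hT] at h10
          simpa using h10
        rw [hrec]
        have hhead : pvFmt (v :: t) (0, f 0) =
            (if ((t.takeWhile (fun y => y == v)).length : Int) + 1 > 1
              then PySem.Int.toStr (((t.takeWhile (fun y => y == v)).length : Int) + 1) ++ " " ++ v
              else v) := by
          have h8 : f 0 = (t.takeWhile (fun y => y == v)).length + 1 := by simp [hf]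
          rw [h8, pvFmt_head]
        rw [hhead]

-- ===== VERDICT (by name: the statement is the Claim_ definition above) =====
theorem print_constraint_py_spec : Claim_equal_print_constraint_py := by
  intro xs _
  unfold Spec_print_constraint_py print_constraint_py print_constraint_py_alt
  match xs with
  | [] => rfl
  | x :: t =>
    simp only []
    rw [pvA_loop t x 1 [], pvParts_eq_runs (x :: t), pvRuns_cons]
    simp
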